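-- pv_equiv track=rewrite | github.com/jacob-dowdy/Intro-to-Python-Fundamentals | 21 - poem_mixer.py | word_mixer
-- ===== SOURCE A (Python) =====
-- def word_mixer(org_list):
--     org_list.sort()
--     new_words = []
--     count = 0
--     while len(org_list) > 5:
--         new_words.append(org_list.pop(-5))
--         new_words.append(org_list.pop(0))
--         new_words.append(org_list.pop(-1))
--     new_words = ' '.join(new_words)
--
--     return new_words
-- ===== SOURCE B (Python) =====
-- def word_mixer(org_list):
--     # Same removal pattern, but every step is O(1): the front is tracked with an
--     # index instead of pop(0), and the 5th word from the end is reached by setting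
--     # aside the last four words on a small stack, taking it, and putting them back.
--     # (Works on a sorted copy; the input list is left untouched.)
--     words = sorted(org_list)
--     lo = 0
--     out = []
--     while len(words) - lo > 5:
--         tail = [words.pop(), words.pop(), words.pop(), words.pop()]
--         out.append(words.pop())            # 5th word from the end
--         while tail:
--             words.append(tail.pop())
--         out.append(words[lo])              # first remaining word
--         lo += 1
--         out.append(words.pop())            # last word
--     return ' '.join(out)
-- ===== Notes on version B (the rewrite author's own statement) =====
-- stated objective: faster
-- what changed: Replaces A's mutating pop(-5)/pop(0)/pop(-1) loop (each pop O(n)) by an O(1)-per-step simulation: a front index instead of pop(0), and the 5th-from-end reached via a constant-size temp stack of right pops.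
import Mathlib
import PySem

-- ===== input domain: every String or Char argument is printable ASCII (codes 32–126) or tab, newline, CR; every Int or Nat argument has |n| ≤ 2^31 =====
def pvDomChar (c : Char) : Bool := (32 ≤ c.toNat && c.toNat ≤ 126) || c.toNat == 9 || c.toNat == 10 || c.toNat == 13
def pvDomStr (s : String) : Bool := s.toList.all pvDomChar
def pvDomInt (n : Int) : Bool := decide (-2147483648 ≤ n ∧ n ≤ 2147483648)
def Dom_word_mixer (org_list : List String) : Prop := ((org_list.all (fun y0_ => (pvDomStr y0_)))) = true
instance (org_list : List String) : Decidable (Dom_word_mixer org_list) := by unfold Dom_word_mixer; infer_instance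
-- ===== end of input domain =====

-- B replaces A's quadratic pop(-5)/pop(0)/pop(-1) loop by an O(1)-per-step simulation
-- (front index + constant temp stack of right pops); A sorts/pops org_list in place,
-- B works on a copy — the equivalence proved here is about the return value only.

-- ===== PORT A =====
-- the while loop: fuel = initial length (each iteration removes 3 elements, so it suffices)
def wmLoop : Nat → List String → List String → List String
  | 0, _, acc => acc
  | fuel + 1, cur, acc =>
    if 5 < cur.length then
      match PySem.List.pop? cur (-5) with
      | some (w1, c1) =>
        match PySem.List.pop? c1 0 with
        | some (w2, c2) =>
          match PySem.List.pop? c2 (-1) with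
          | some (w3, c3) => wmLoop fuel c3 (acc ++ [w1, w2, w3])
          | none => acc
        | none => acc
      | none => acc
    else acc

def word_mixer (org_list : List String) : String :=
  let s := PySem.List.sorted org_list (fun x => x) false
  PySem.Str.join " " (wmLoop s.length s [])

-- ===== PORT B =====
-- Source B's while loop; state = (words, lo, out), fuel = initial length.
-- The four right pops into `tail` and the `while tail: words.append(tail.pop())`
-- drain are transliterated as the matching pop? (-1) chain and the re-append.
def wmAltLoop : Nat → List String → Nat → List String → List String
  | 0, _, _, out => out
  | fuel + 1, words, lo, out =>
    if 5 < words.length - lo then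
      match PySem.List.pop? words (-1) with
      | some (t1, w1) =>
        match PySem.List.pop? w1 (-1) with
        | some (t2, w2) =>
          match PySem.List.pop? w2 (-1) with
          | some (t3, w3) =>
            match PySem.List.pop? w3 (-1) with
            | some (t4, w4) =>
              match PySem.List.pop? w4 (-1) with
              | some (v, w5) =>
                -- while tail: words.append(tail.pop())  (tail = [t1,t2,t3,t4], popped t4..t1)
                let words' := w5 ++ [t4, t3, t2, t1]
                let out' := out ++ [v, words'.getD lo ""]   -- words[lo], always in range here
                match PySem.List.pop? words' (-1) with
                | some (last, w6) => wmAltLoop fuel w6 (lo + 1) (out' ++ [last])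
                | none => out'
              | none => out
            | none => out
          | none => out
        | none => out
      | none => out
    else out

def word_mixer_alt (org_list : List String) : String :=
  let s := PySem.List.sorted org_list (fun x => x) false
  PySem.Str.join " " (wmAltLoop s.length s 0 [])

-- ===== PRECONDITION & SPEC =====
def Spec_word_mixer (org_list : List String) (out : String) : Prop := out = word_mixer_alt org_list
instance (org_list : List String) (out : String) : Decidable (Spec_word_mixer org_list out) := by unfold Spec_word_mixer; infer_instance

-- ===== CLAIM =====
def Claim_equal_word_mixer : Prop := ∀ (org_list : List String), Dom_word_mixer org_list → Spec_word_mixer org_list (word_mixer org_list)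

-- ===== LEMMAS AND PROOFS =====

lemma wm_pop_neg5 (F : List String) (t0 t1 t2 t3 t4 : String) :
    PySem.List.pop? (F ++ [t0, t1, t2, t3, t4]) (-5) = some (t0, F ++ [t1, t2, t3, t4]) := by
  have hlen : (F ++ [t0, t1, t2, t3, t4]).length = F.length + 5 := by simp
  have hidx : PySem.List.pyIdx? (F ++ [t0, t1, t2, t3, t4]).length (-5) = some F.length := by
    rw [hlen]; simp [PySem.List.pyIdx?]
  rw [PySem.List.pop?, hidx]
  simp
  rw [List.eraseIdx_append_of_length_le (le_refl F.length)]; simp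

lemma wm_exists_five (t : List String) (h : t.length = 5) :
    ∃ a b c d e, t = [a, b, c, d, e] := by
  rcases t with _ | ⟨a, _ | ⟨b, _ | ⟨c, _ | ⟨d, _ | ⟨e, _ | ⟨f, r⟩⟩⟩⟩⟩⟩ <;> simp_all

lemma wm_getD_append (pre L : List String) (x : String) :
    ((pre ++ (x :: L)).getD pre.length "") = x := by
  rw [List.getD_eq_getElem _ "" (by simp)]
  simp

-- the invariant: B's (words, lo) with words = pre ++ cur, lo = pre.length
-- simulates A's current list cur; both loops then produce the same output.
lemma wm_loops_eq (fuel : Nat) :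
    ∀ (pre cur out : List String),
      wmAltLoop fuel (pre ++ cur) pre.length out = wmLoop fuel cur out := by
  induction fuel with
  | zero => intro pre cur out; rfl
  | succ f ih =>
    intro pre cur out
    by_cases h : 5 < cur.length
    · -- decompose cur = (f0 :: M') ++ [v, a, b, c, d]
      obtain ⟨v, a, b, c, d, hvd⟩ :=
        wm_exists_five (cur.drop (cur.length - 5)) (by simp; omega)
      have hsplit : cur = cur.take (cur.length - 5) ++ [v, a, b, c, d] := by
        conv_lhs => rw [← List.take_append_drop (cur.length - 5) cur]
        rw [hvd]
      rcases hM : cur.take (cur.length - 5) with _ | ⟨f0, M'⟩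
      · exfalso
        have := congrArg List.length hM
        simp [List.length_take] at this; omega
      rw [hM] at hsplit
      have hcondA : 5 < cur.length := h
      have hcondB : 5 < (pre ++ cur).length - pre.length := by simp; omega
      -- A's step
      have hA1 : PySem.List.pop? ((f0 :: M') ++ [v, a, b, c, d]) (-5)
          = some (v, (f0 :: M') ++ [a, b, c, d]) := wm_pop_neg5 _ _ _ _ _ _
      have hA2 : PySem.List.pop? ((f0 :: M') ++ [a, b, c, d]) 0
          = some (f0, M' ++ [a, b, c, d]) := by
        simp [PySem.List.pop?_zero_cons]
      have hA3 : PySem.List.pop? (M' ++ [a, b, c, d]) (-1) = some (d, M' ++ [a, b, c]) := by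
        rw [show M' ++ [a, b, c, d] = (M' ++ [a, b, c]) ++ [d] from by simp,
            PySem.List.pop?_last]
      rw [wmLoop, if_pos hcondA, hsplit]
      simp only [hA1, hA2, hA3]
      -- B's step
      have hB1 : PySem.List.pop? (pre ++ ((f0 :: M') ++ [v, a, b, c, d])) (-1)
          = some (d, (pre ++ (f0 :: M')) ++ [v, a, b, c]) := by
        rw [show pre ++ ((f0 :: M') ++ [v, a, b, c, d])
              = ((pre ++ (f0 :: M')) ++ [v, a, b, c]) ++ [d] from by simp,
            PySem.List.pop?_last]
      have hB2 : PySem.List.pop? ((pre ++ (f0 :: M')) ++ [v, a, b, c]) (-1)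
          = some (c, (pre ++ (f0 :: M')) ++ [v, a, b]) := by
        rw [show (pre ++ (f0 :: M')) ++ [v, a, b, c]
              = ((pre ++ (f0 :: M')) ++ [v, a, b]) ++ [c] from by simp,
            PySem.List.pop?_last]
      have hB3 : PySem.List.pop? ((pre ++ (f0 :: M')) ++ [v, a, b]) (-1)
          = some (b, (pre ++ (f0 :: M')) ++ [v, a]) := by
        rw [show (pre ++ (f0 :: M')) ++ [v, a, b]
              = ((pre ++ (f0 :: M')) ++ [v, a]) ++ [b] from by simp,
            PySem.List.pop?_last]
      have hB4 : PySem.List.pop? ((pre ++ (f0 :: M')) ++ [v, a]) (-1)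
          = some (a, (pre ++ (f0 :: M')) ++ [v]) := by
        rw [show (pre ++ (f0 :: M')) ++ [v, a]
              = ((pre ++ (f0 :: M')) ++ [v]) ++ [a] from by simp,
            PySem.List.pop?_last]
      have hB5 : PySem.List.pop? ((pre ++ (f0 :: M')) ++ [v]) (-1)
          = some (v, pre ++ (f0 :: M')) :=
        PySem.List.pop?_last _ _
      have hgd : ((pre ++ (f0 :: M')) ++ [a, b, c, d]).getD pre.length "" = f0 := by
        rw [show (pre ++ (f0 :: M')) ++ [a, b, c, d]
              = pre ++ (f0 :: (M' ++ [a, b, c, d])) from by simp]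
        exact wm_getD_append pre _ f0
      have hB6 : PySem.List.pop? ((pre ++ (f0 :: M')) ++ [a, b, c, d]) (-1)
          = some (d, (pre ++ (f0 :: M')) ++ [a, b, c]) := by
        rw [show (pre ++ (f0 :: M')) ++ [a, b, c, d]
              = ((pre ++ (f0 :: M')) ++ [a, b, c]) ++ [d] from by simp,
            PySem.List.pop?_last]
      rw [wmAltLoop, if_pos (show 5 < (pre ++ ((f0 :: M') ++ [v, a, b, c, d])).length - pre.length by simp)]
      simp only [hB1, hB2, hB3, hB4, hB5, hgd, hB6]
      have hpre' : (pre ++ (f0 :: M')) ++ [a, b, c]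
          = (pre ++ [f0]) ++ (M' ++ [a, b, c]) := by simp
      rw [hpre']
      have hlo : pre.length + 1 = (pre ++ [f0]).length := by simp
      rw [hlo, show out ++ [v, f0] ++ [d] = out ++ [v, f0, d] from by simp]
      exact ih (pre ++ [f0]) (M' ++ [a, b, c]) (out ++ [v, f0, d])
    · rw [wmLoop, if_neg h, wmAltLoop, if_neg (by simp; omega)]

-- ===== VERDICT =====
theorem word_mixer_spec : Claim_equal_word_mixer := by
  intro org_list _
  unfold Spec_word_mixer
  simp only [word_mixer, word_mixer_alt]
  rw [← wm_loops_eq _ [] _ []]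
  simp
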